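-- pv_equiv track=rewrite | github.com/seokjaehong/daily_study | programmers/lev1_약수개수와덧셈.py | get_div_cnt
-- ===== SOURCE A (Python) =====
-- def get_div_cnt(num):
--     cnt=1
--     for x in range(1,num):
--         if num%x==0:
--             cnt+=1
--     if cnt%2==0:
--         return True
--     return False
-- ===== SOURCE B (Python) =====
-- import math
--
-- def get_div_cnt(num):
--     if num < 1:
--         return False
--     r = math.isqrt(num)
--     return r * r != num
-- ===== Notes on version B (the rewrite author's own statement) =====
-- stated objective: faster
-- what changed: Replaced the O(n) divisor-counting loop by the closed form: the divisor count is even iff num is not a perfect square, tested with one integer square root.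
import Mathlib
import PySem

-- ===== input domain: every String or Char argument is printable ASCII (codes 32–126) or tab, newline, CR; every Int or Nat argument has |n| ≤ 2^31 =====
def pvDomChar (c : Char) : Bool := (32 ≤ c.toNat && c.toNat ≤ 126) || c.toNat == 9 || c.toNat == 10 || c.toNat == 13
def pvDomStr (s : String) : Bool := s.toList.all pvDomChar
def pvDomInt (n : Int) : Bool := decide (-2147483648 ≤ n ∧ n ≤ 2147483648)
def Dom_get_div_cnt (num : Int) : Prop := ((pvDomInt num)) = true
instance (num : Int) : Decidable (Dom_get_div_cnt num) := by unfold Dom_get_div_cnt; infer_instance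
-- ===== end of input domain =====

-- B replaces A's O(n) divisor-counting loop by the closed form
-- "the divisor count is even iff num is not a perfect square" (one integer square root).

-- ===== PORT A =====
def get_div_cnt (num : Int) : Bool :=
  let cnt : Int := (PySem.List.pyRange 1 num 1).foldl
    (fun cnt x => if PySem.Int.mod num x = 0 then cnt + 1 else cnt) 1
  if PySem.Int.mod cnt 2 = 0 then true else false

-- ===== PORT B =====
-- math.isqrt on a nonnegative int is ported as Nat.sqrt (exact there; the num < 1 guard
-- keeps the argument nonnegative, as in Source B).
def get_div_cnt_alt (num : Int) : Bool :=
  if num < 1 then false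
  else
    let r : Int := (Nat.sqrt num.toNat : Int)
    r * r != num

-- ===== PRECONDITION & SPEC =====
def Spec_get_div_cnt (num : Int) (out : Bool) : Prop := out = get_div_cnt_alt num
instance (num : Int) (out : Bool) : Decidable (Spec_get_div_cnt num out) := by unfold Spec_get_div_cnt; infer_instance

-- ===== CLAIM (what is proved, stated in full; the proofs are below) =====
def Claim_equal_get_div_cnt : Prop := ∀ (num : Int), Dom_get_div_cnt num → Spec_get_div_cnt num (get_div_cnt num)

-- ===== LEMMAS AND PROOFS =====

-- the counting fold is an initial value plus a countP
theorem pv_foldl_count {α : Type} (p : α → Prop) [DecidablePred p] (l : List α) (c0 : Int) :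
    l.foldl (fun c x => if p x then c + 1 else c) c0
      = c0 + l.countP (fun x => decide (p x)) := by
  induction l generalizing c0 with
  | nil => simp
  | cons a t ih =>
    by_cases h : p a <;> simp [List.countP_cons, h, ih] <;> ring

-- countP of divisibility over a range
def pvD (n m : ℕ) : ℕ := (List.range m).countP (fun d => decide (d ∣ n))

theorem pvD_card (n : ℕ) (m : ℕ) :
    pvD n m = ((Finset.range m).filter (fun d => d ∣ n)).card := by
  induction m with
  | zero => simp [pvD]
  | succ k ih =>
    rw [Finset.range_add_one, Finset.filter_insert]
    by_cases h : k ∣ n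
    · rw [if_pos h, Finset.card_insert_of_notMem (by simp), ← ih]
      simp [pvD, List.range_succ, List.countP_append, h]
    · rw [if_neg h, ← ih]
      simp [pvD, List.range_succ, List.countP_append, h]

theorem pvD_divisors (n : ℕ) (hn : 1 ≤ n) : pvD n (n + 1) = n.divisors.card := by
  rw [pvD_card]
  congr 1
  ext d
  simp only [Finset.mem_filter, Finset.mem_range, Nat.mem_divisors]
  constructor
  · rintro ⟨_, hd⟩; exact ⟨hd, by omega⟩
  · rintro ⟨hd, _⟩; exact ⟨by have := Nat.le_of_dvd (by omega) hd; omega, hd⟩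

theorem pvD_succ (n : ℕ) (hn : 1 ≤ n) : pvD n (n + 1) = pvD n n + 1 := by
  simp [pvD, List.range_succ, List.countP_append]

-- IsSquare in terms of factorization parity
theorem pv_isSquare_iff_even_factorization {n : ℕ} (hn : n ≠ 0) :
    IsSquare n ↔ ∀ p, Even (n.factorization p) := by
  constructor
  · rintro ⟨r, rfl⟩ p
    have hr : r ≠ 0 := by rintro rfl; simp at hn
    rw [Nat.factorization_mul hr hr]
    exact ⟨r.factorization p, rfl⟩
  · intro h
    refine ⟨n.primeFactors.prod (fun p => p ^ (n.factorization p / 2)), ?_⟩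
    rw [← Finset.prod_mul_distrib]
    have : ∀ p ∈ n.primeFactors,
        p ^ (n.factorization p / 2) * p ^ (n.factorization p / 2) = p ^ n.factorization p := by
      intro p _
      rw [← pow_add]
      congr 1
      obtain ⟨k, hk⟩ := h p
      omega
    rw [Finset.prod_congr rfl this]
    conv_lhs => rw [← Nat.factorization_prod_pow_eq_self hn]
    rw [Nat.prod_factorization_eq_prod_primeFactors]

-- odd product iff every factor is odd
theorem pv_odd_prod (s : Finset ℕ) (f : ℕ → ℕ) : Odd (s.prod f) ↔ ∀ p ∈ s, Odd (f p) := by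
  induction s using Finset.induction_on with
  | empty => simp
  | insert a t ha ih => rw [Finset.prod_insert ha, Nat.odd_mul, ih]; simp [ha]

theorem pv_odd_card_divisors {n : ℕ} (hn : n ≠ 0) : Odd n.divisors.card ↔ IsSquare n := by
  rw [Nat.card_divisors hn, pv_isSquare_iff_even_factorization hn, pv_odd_prod]
  constructor
  · intro h p
    by_cases hp : p ∈ n.primeFactors
    · obtain ⟨k, hk⟩ := h p hp; exact ⟨k, by omega⟩
    · have h0 : n.factorization p = 0 :=
        Finsupp.notMem_support_iff.1 (by rwa [Nat.support_factorization])
      simp [h0]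
  · intro h p _
    obtain ⟨k, hk⟩ := h p
    exact ⟨k, by omega⟩

-- parity of the divisor count vs perfect-square test
theorem pv_even_card_divisors {n : ℕ} (hn : 1 ≤ n) :
    (n.divisors.card % 2 = 0) ↔ ¬ (Nat.sqrt n * Nat.sqrt n = n) := by
  have hn0 : n ≠ 0 := by omega
  have hsq : IsSquare n ↔ Nat.sqrt n * Nat.sqrt n = n := by
    rw [← Nat.exists_mul_self]
    exact ⟨fun ⟨r, h⟩ => ⟨r, h.symm⟩, fun ⟨r, h⟩ => ⟨r, h.symm⟩⟩
  rw [← Nat.even_iff, ← Nat.not_odd_iff_even, pv_odd_card_divisors hn0, hsq]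

-- ===== VERDICT (by name: the statement is the Claim_ definition above) =====
theorem get_div_cnt_spec : Claim_equal_get_div_cnt := by
  intro num _
  unfold Spec_get_div_cnt
  simp only [get_div_cnt, get_div_cnt_alt]
  by_cases hlt : num < 1
  · -- empty range, cnt = 1, odd → false on both sides
    have : PySem.List.pyRange 1 num 1 = [] := by
      rw [PySem.List.pyRange_one]
      have : (num - 1).toNat = 0 := by omega
      simp [this]
    simp [this, hlt, PySem.Int.mod]
  · push_neg at hlt
    set n : ℕ := num.toNat with hn
    have hnum : num = (n : Int) := by omega
    have hn1 : 1 ≤ n := by omega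
    -- evaluate A's fold
    rw [pv_foldl_count]
    rw [PySem.List.pyRange_one]
    have hcount : ((List.range (num - 1).toNat).map (fun k : ℕ => (1 : Int) + k)).countP
        (fun x => decide (PySem.Int.mod num x = 0)) = pvD n n := by
      rw [List.countP_map]
      have hlen : (num - 1).toNat = n - 1 := by omega
      rw [hlen]
      have hshift : ∀ k : ℕ, ((fun x => decide (PySem.Int.mod num x = 0)) ∘
          (fun k : ℕ => (1 : Int) + k)) k = decide ((k + 1) ∣ n) := by
        intro k
        simp only [Function.comp]
        have h1 : PySem.Int.mod num ((1 : Int) + k) = ((n % (k + 1) : ℕ) : Int) := by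
          rw [hnum, show (1 : Int) + k = ((k + 1 : ℕ) : Int) by push_cast; ring]
          exact PySem.Int.mod_natCast n (k + 1)
        simp only [h1, Int.natCast_eq_zero]
        rw [decide_eq_decide]
        exact Nat.dvd_iff_mod_eq_zero.symm
      rw [List.countP_congr (fun k _ => by rw [hshift k])]
      -- countP (range (n-1)) (k+1 ∣ n) = pvD n n  (0 ∤ n since n ≥ 1)
      unfold pvD
      have hrange : List.range n = 0 :: (List.range (n - 1)).map Nat.succ := by
        conv_lhs => rw [show n = (n - 1) + 1 by omega]
        rw [List.range_succ_eq_map]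
      rw [hrange]
      have h0 : ¬ ((0 : ℕ) ∣ n) := by omega
      simp only [List.countP_cons, List.countP_map, h0, decide_false, if_false, cond_false]
      refine List.countP_congr fun k _ => ?_
      simp [Function.comp, Nat.succ_eq_add_one]
    rw [hcount]
    -- cnt = 1 + pvD n n = divisors card
    have hcard : 1 + (pvD n n : Int) = (n.divisors.card : Int) := by
      have := pvD_divisors n hn1
      have := pvD_succ n hn1
      omega
    rw [hcard]
    -- both sides as parity vs perfect square
    have hmod : PySem.Int.mod ((n.divisors.card : Int)) 2 = ((n.divisors.card % 2 : ℕ) : Int) := by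
      exact_mod_cast PySem.Int.mod_natCast n.divisors.card 2
    rw [hmod]
    have hiff := pv_even_card_divisors hn1
    have hnlt : ¬ num < 1 := by omega
    simp only [hnlt, if_false]
    by_cases hsq : Nat.sqrt n * Nat.sqrt n = n
    · have hodd : ¬ (n.divisors.card % 2 = 0) := fun h => (hiff.1 h) hsq
      have : n.divisors.card % 2 = 1 := by omega
      rw [this]
      have : ((Nat.sqrt n : Int)) * (Nat.sqrt n : Int) = num := by
        rw [hnum]; exact_mod_cast hsq
      simp [this]
    · have heven : n.divisors.card % 2 = 0 := hiff.2 hsq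
      rw [heven]
      have hne : ((Nat.sqrt n : Int)) * (Nat.sqrt n : Int) ≠ num := by
        rw [hnum]
        intro h
        exact hsq (by exact_mod_cast h)
      simp [hne]
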